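-- pv_equiv track=rewrite | github.com/VeganwarsDeluxe/DeluxeTelegramBot | utils/LineMerger.py | merge_oneline
-- ===== SOURCE A (Python) =====
-- def merge_oneline(text):
--     text += ['\n']
--     new_text = []
--     counter = 1
--
--     for i in range(len(text)):
--
--         if i == 0:
--             continue
--
--         if text[i] != text[i - 1]:
--             new_line = f"{text[i - 1]}" if counter == 1 else f"[{text[i - 1]}]✖{counter}"
--             new_text.append(new_line)
--             counter = 1
--         else:
--             counter += 1
--
--     return new_text
-- ===== SOURCE B (Python) =====
-- def merge_oneline(text):
--     # Same in-place mutation as the original: append the '\n' sentinel.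
--     text += ['\n']
--     # Pass 1: run-length encode into (value, count) groups.
--     groups = []
--     for v in text:
--         if groups and groups[-1][0] == v:
--             groups[-1][1] += 1
--         else:
--             groups.append([v, 1])
--     # Pass 2: format every group except the last (the sentinel group).
--     return [k if c == 1 else f"[{k}]✖{c}" for k, c in groups[:-1]]
-- ===== Notes on version B (the rewrite author's own statement) =====
-- stated objective: simpler
-- what changed: Replaces the index-based loop comparing text[i] with text[i-1] under a running counter by two separate passes: a run-length encoding into (value,count) groups followed by formatting all groups but the last (sentinel) one.
import Mathlib
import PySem

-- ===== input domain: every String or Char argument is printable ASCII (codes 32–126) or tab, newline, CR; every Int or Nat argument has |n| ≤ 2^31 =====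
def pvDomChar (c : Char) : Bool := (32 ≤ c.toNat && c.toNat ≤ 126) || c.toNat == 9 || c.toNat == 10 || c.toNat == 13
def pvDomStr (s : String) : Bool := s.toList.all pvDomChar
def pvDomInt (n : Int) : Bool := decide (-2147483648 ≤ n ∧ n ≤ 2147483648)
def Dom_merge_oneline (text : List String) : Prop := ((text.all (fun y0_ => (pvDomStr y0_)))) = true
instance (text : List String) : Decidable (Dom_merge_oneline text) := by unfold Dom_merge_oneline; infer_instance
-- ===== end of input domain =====

-- B replaces A's index-based counting loop by run-length-encode-then-format (two passes); same return value.
-- Both A and B mutate the argument list in place the same way (append '\n'); the equivalence is about the return value.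


-- ===== PORT A =====
-- f"{prev}" if counter == 1 else f"[{prev}]✖{counter}"
def fmtA (prev : String) (counter : Int) : String :=
  if counter == 1 then prev else "[" ++ prev ++ "]✖" ++ PySem.Int.toStr counter

-- one iteration of A's for-loop body; state = (new_text, counter)
def stepA (t : List String) (s : List String × Int) (i : Nat) : List String × Int :=
  if i == 0 then s
  else if t.getD i "" ≠ t.getD (i - 1) "" then (s.1 ++ [fmtA (t.getD (i - 1) "") s.2], 1)
  else (s.1, s.2 + 1)

def merge_oneline (text : List String) : List String :=
  let t := text ++ ["\n"]
  ((List.range t.length).foldl (stepA t) ([], 1)).1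

-- ===== PORT B =====
def fmtB (g : String × Int) : String :=
  if g.2 == 1 then g.1 else "[" ++ g.1 ++ "]✖" ++ PySem.Int.toStr g.2

-- pass 1 of Source B: run-length encode into (value, count) groups
def stepB (gs : List (String × Int)) (v : String) : List (String × Int) :=
  match gs.getLast? with
  | some (k, c) => if k == v then gs.dropLast ++ [(k, c + 1)] else gs ++ [(v, 1)]
  | none => [(v, 1)]

def merge_oneline_alt (text : List String) : List String :=
  let groups := (text ++ ["\n"]).foldl stepB []
  groups.dropLast.map fmtB

-- ===== PRECONDITION & SPEC =====
def Spec_merge_oneline (text : List String) (out : List String) : Prop := out = merge_oneline_alt text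
instance (text : List String) (out : List String) : Decidable (Spec_merge_oneline text out) := by unfold Spec_merge_oneline; infer_instance

-- ===== CLAIM (what is proved, stated in full; the proofs are below) =====
def Claim_equal_merge_oneline : Prop := ∀ (text : List String), Dom_merge_oneline text → Spec_merge_oneline text (merge_oneline text)

-- ===== LEMMAS AND PROOFS =====

-- common recursive characterisation: process the suffix, prev = previous element, c = current counter
def pf : String → List String → List String → Int → List String × Int
  | _, [], acc, c => (acc, c)
  | p, q :: rest, acc, c =>
      if q ≠ p then pf q rest (acc ++ [fmtA p c]) 1
      else pf q rest acc (c + 1)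

theorem getD_append_len {pre rest : List String} {p : String} :
    (pre ++ p :: rest).getD pre.length "" = p := by
  simp [List.getD]

theorem A_gen (rest : List String) : ∀ (pre : List String) (p : String) (acc : List String) (c : Int),
    (List.range' (pre.length + 1) rest.length).foldl (stepA (pre ++ p :: rest)) (acc, c)
      = pf p rest acc c := by
  induction rest with
  | nil => intro pre p acc c; simp [pf]
  | cons q rest ih =>
    intro pre p acc c
    simp only [List.length_cons]
    rw [List.range'_succ, List.foldl_cons]
    have hq : (pre ++ p :: q :: rest).getD (pre.length + 1) "" = q := by
      have : pre ++ p :: q :: rest = (pre ++ [p]) ++ q :: rest := by simp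
      rw [this]
      have hl : pre.length + 1 = (pre ++ [p]).length := by simp
      rw [hl, getD_append_len]
    have hp : (pre ++ p :: q :: rest).getD (pre.length + 1 - 1) "" = p := by
      simp only [Nat.add_sub_cancel]
      have : pre ++ p :: q :: rest = pre ++ p :: (q :: rest) := rfl
      rw [this, getD_append_len]
    have hs : stepA (pre ++ p :: q :: rest) (acc, c) (pre.length + 1)
        = if q ≠ p then (acc ++ [fmtA p c], 1) else (acc, c + 1) := by
      unfold stepA
      rw [hq, hp]
      simp
    have hlist : pre ++ p :: q :: rest = (pre ++ [p]) ++ q :: rest := by simp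
    rw [hs]
    by_cases h : q ≠ p
    · rw [if_pos h, hlist]
      have := ih (pre ++ [p]) q (acc ++ [fmtA p c]) 1
      simp only [List.length_append, List.length_cons, List.length_nil] at this
      simpa [pf, h] using this
    · rw [if_neg h, hlist]
      have := ih (pre ++ [p]) q acc (c + 1)
      simp only [List.length_append, List.length_cons, List.length_nil] at this
      simpa [pf, h] using this

theorem B_gen (rest : List String) : ∀ (gs : List (String × Int)) (p : String) (c : Int),
    ((rest.foldl stepB (gs ++ [(p, c)])).dropLast).map fmtB
      = (pf p rest (gs.map fmtB) c).1 := by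
  induction rest with
  | nil => intro gs p c; simp [pf]
  | cons q rest ih =>
    intro gs p c
    rw [List.foldl_cons]
    have hstep : stepB (gs ++ [(p, c)]) q
        = if p == q then gs ++ [(p, c + 1)] else (gs ++ [(p, c)]) ++ [(q, 1)] := by
      unfold stepB
      rw [List.getLast?_concat]
      by_cases h : p = q <;> simp [h]
    rw [hstep]
    by_cases h : p = q
    · simp only [h, beq_self_eq_true, if_true]
      have := ih gs q (c + 1)
      simpa [pf, h] using this
    · have hb : (p == q) = false := by simp [h]
      rw [hb]
      simp only [Bool.false_eq_true, if_false]
      have := ih (gs ++ [(p, c)]) q 1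
      have hfmt : ((gs ++ [(p, c)]).map fmtB) = gs.map fmtB ++ [fmtA p c] := by
        simp [fmtB, fmtA]
      rw [hfmt] at this
      have hneq : q ≠ p := fun hqp => h hqp.symm
      simpa [pf, hneq] using this

-- ===== VERDICT (by name: the statement is the Claim_ definition above) =====
theorem merge_oneline_spec : Claim_equal_merge_oneline := by
  intro text _
  unfold Spec_merge_oneline merge_oneline merge_oneline_alt
  cases h : text ++ ["\n"] with
  | nil => exact absurd h (by simp)
  | cons p rest =>
    -- A side
    have hA : (List.range (p :: rest).length).foldl (stepA (p :: rest)) ([], 1)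
        = pf p rest [] 1 := by
      have hr : List.range (p :: rest).length = 0 :: List.range' 1 rest.length := by
        simp [List.range_eq_range', List.range'_succ]
      rw [hr, List.foldl_cons]
      have h0 : stepA (p :: rest) ([], 1) 0 = ([], 1) := by simp [stepA]
      rw [h0]
      have := A_gen rest [] p [] 1
      simpa using this
    -- B side
    have hB : ((rest.foldl stepB [(p, 1)]).dropLast).map fmtB = (pf p rest [] 1).1 := by
      have := B_gen rest [] p 1
      simpa using this
    simp only [List.foldl_cons]
    have hs0 : stepB [] p = [(p, 1)] := by simp [stepB]
    rw [hs0, hB, hA]
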